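-- pv_equiv track=rewrite | github.com/tbtrung39/KHDL_K17A3_LAB | lab07/lab07/16.py | tim_cap_chi_so
-- ===== SOURCE A (Python) =====
-- def tim_cap_chi_so(a):
--     cap_chi_so = []
--     n = len(a)
--     for i in range(n - 1):
--         for j in range(i + 1, n):
--             if a[i] + 1 == a[j]:
--                 cap_chi_so.append((i, j))
--     return cap_chi_so
-- ===== SOURCE B (Python) =====
-- def tim_cap_chi_so(a):
--     # index positions of each value, in ascending order
--     pos = {}
--     for i, x in enumerate(a):
--         pos.setdefault(x, []).append(i)
--     res = []
--     for i, x in enumerate(a):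
--         js = pos.get(x + 1, [])
--         # positions > i form a suffix of js; collect it by walking from the end
--         tail = []
--         for j in reversed(js):
--             if j <= i:
--                 break
--             tail.append(j)
--         tail.reverse()
--         for j in tail:
--             res.append((i, j))
--     return res
-- ===== Notes on version B (the rewrite author's own statement) =====
-- stated objective: faster
-- what changed: Replaced the nested index scan by a single pass that builds a value->ascending-index-list dictionary, then for each i emits only the positions of a[i]+1 greater than i (taken as a suffix via a reversed walk), making it output-sensitive O(n + k) instead of O(n^2).
import Mathlib
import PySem

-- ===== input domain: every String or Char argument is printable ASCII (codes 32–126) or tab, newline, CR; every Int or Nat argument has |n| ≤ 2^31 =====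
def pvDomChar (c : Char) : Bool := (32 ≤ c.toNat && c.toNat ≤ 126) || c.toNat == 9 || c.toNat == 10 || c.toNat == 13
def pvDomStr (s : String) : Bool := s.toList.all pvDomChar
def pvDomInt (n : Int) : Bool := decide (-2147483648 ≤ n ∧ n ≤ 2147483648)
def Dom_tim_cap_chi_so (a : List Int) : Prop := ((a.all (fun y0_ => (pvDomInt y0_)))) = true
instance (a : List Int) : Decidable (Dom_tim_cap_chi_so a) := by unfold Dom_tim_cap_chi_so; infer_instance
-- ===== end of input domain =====

-- B replaces A's O(n^2) double scan by a value→sorted-index-list dictionary and,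
-- per i, reads off only the positions of a[i]+1 that exceed i (output-sensitive).


-- ===== PORT A =====
def tim_cap_chi_so (a : List Int) : List (Int × Int) :=
  let n : Int := a.length
  (PySem.List.pyRange 0 (n - 1) 1).foldl (fun acc i =>
    (PySem.List.pyRange (i + 1) n 1).foldl (fun acc j =>
      if PySem.List.pyGetD a i 0 + 1 == PySem.List.pyGetD a j 0 then acc ++ [(i, j)] else acc) acc) []

-- ===== PORT B =====
-- pos = {}; for i, x in enumerate(a): pos.setdefault(x, []).append(i)
def pvPositions (a : List Int) : PySem.Dict Int (List Int) :=
  (PySem.List.enumerate a 0).foldl (fun d p => d.modify p.2 [] (fun js => js ++ [p.1])) PySem.Dict.empty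

-- the reversed-walk-with-break collecting the indices > i, re-reversed
def pvTailGt (i : Int) (js : List Int) : List Int :=
  (js.reverse.takeWhile (fun j => decide (i < j))).reverse

def tim_cap_chi_so_alt (a : List Int) : List (Int × Int) :=
  let pos := pvPositions a
  (PySem.List.enumerate a 0).foldl (fun res p =>
    res ++ (pvTailGt p.1 (pos.getD (p.2 + 1) [])).map (fun j => (p.1, j))) []

-- ===== PRECONDITION & SPEC =====
def Spec_tim_cap_chi_so (a : List Int) (out : List (Int × Int)) : Prop := out = tim_cap_chi_so_alt a
instance (a : List Int) (out : List (Int × Int)) : Decidable (Spec_tim_cap_chi_so a out) := by unfold Spec_tim_cap_chi_so; infer_instance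

-- ===== CLAIM (what is proved, stated in full; the proofs are below) =====
def Claim_equal_tim_cap_chi_so : Prop := ∀ (a : List Int), Dom_tim_cap_chi_so a → Spec_tim_cap_chi_so a (tim_cap_chi_so a)

-- ===== LEMMAS AND PROOFS =====

-- the positions dictionary: looking up v yields the first components of the pairs with second component v
theorem pvPositions_getD (l : List (Int × Int)) (d : PySem.Dict Int (List Int)) (v : Int) :
    (l.foldl (fun d p => d.modify p.2 [] (fun js => js ++ [p.1])) d).getD v []
      = d.getD v [] ++ (l.filter (fun p => p.2 == v)).map (·.1) := by
  induction l generalizing d with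
  | nil => simp
  | cons p t ih =>
    simp only [List.foldl_cons, ih, List.filter_cons]
    by_cases h : p.2 = v
    · subst h
      simp [PySem.Dict.getD_modify_self]
    · rw [PySem.Dict.getD_modify_of_ne]
      · simp [h]
      · exact fun hvv => h hvv.symm

-- on a strictly descending list, takeWhile (i < ·) is filter (i < ·)
theorem takeWhile_desc (i : Int) (L : List Int) (h : L.Pairwise (· > ·)) :
    L.takeWhile (fun j => decide (i < j)) = L.filter (fun j => decide (i < j)) := by
  induction L with
  | nil => rfl
  | cons x t ih =>
    rw [List.pairwise_cons] at h
    by_cases hx : i < x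
    · simp [hx, ih h.2]
    · simp only [List.takeWhile_cons, List.filter_cons, hx, decide_false]
      symm
      simp only [Bool.false_eq_true, if_false]
      rw [List.filter_eq_nil_iff]
      intro y hy
      have := h.1 y hy
      simp only [decide_eq_true_eq]
      omega

-- on a strictly ascending list, the reversed-walk tail is the filter
theorem pvTailGt_eq_filter (i : Int) (L : List Int) (h : L.Pairwise (· < ·)) :
    pvTailGt i L = L.filter (fun j => decide (i < j)) := by
  unfold pvTailGt
  rw [takeWhile_desc i L.reverse (by simpa [List.pairwise_reverse] using h)]
  rw [← List.filter_reverse, List.reverse_reverse]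

-- the range [0, n) filtered to j > i is the range (i, n) (for 0 ≤ i)
theorem filter_pyRange_gt (i n : Int) (hi : 0 ≤ i) :
    (PySem.List.pyRange 0 n 1).filter (fun j => decide (i < j)) = PySem.List.pyRange (i + 1) n 1 := by
  have hperm : (List.filter (fun j => decide (i < j)) (PySem.List.pyRange 0 n 1)).Perm
      (PySem.List.pyRange (i + 1) n 1) := by
    rw [List.perm_ext_iff_of_nodup]
    · intro x
      simp only [List.mem_filter, PySem.List.mem_pyRange_one, decide_eq_true_eq]
      omega
    · exact (PySem.List.nodup_pyRange_one 0 n).filter _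
    · exact PySem.List.nodup_pyRange_one _ n
  exact List.Perm.eq_of_pairwise
    (fun a b _ _ h1 h2 => absurd h2 (not_lt.mpr (le_of_lt h1)))
    ((PySem.List.pairwise_lt_pyRange_one 0 n).sublist (List.filter_sublist))
    (PySem.List.pairwise_lt_pyRange_one _ n) hperm

-- the positions dictionary of B, characterised as a filtered range
theorem pvPositions_spec (a : List Int) (v : Int) :
    (pvPositions a).getD v []
      = (PySem.List.pyRange 0 (a.length : Int) 1).filter (fun j => PySem.List.pyGetD a j 0 == v) := by
  unfold pvPositions
  rw [pvPositions_getD, PySem.List.enumerate_eq_map_pyRange a 0, List.filter_map, List.map_map]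
  simp [Function.comp_def, PySem.List.len]

theorem tim_cap_chi_so_eq (a : List Int) : tim_cap_chi_so a = tim_cap_chi_so_alt a := by
  have hA : tim_cap_chi_so a
      = (PySem.List.pyRange 0 ((a.length : Int) - 1) 1).flatMap (fun i =>
          ((PySem.List.pyRange (i + 1) (a.length : Int) 1).filter
             (fun j => PySem.List.pyGetD a i 0 + 1 == PySem.List.pyGetD a j 0)).map (fun j => (i, j))) := by
    unfold tim_cap_chi_so
    simp only [PySem.List.foldl_append_if, PySem.List.foldl_append_eq_flatMap]
    simp
  have hB : tim_cap_chi_so_alt a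
      = (PySem.List.pyRange 0 (a.length : Int) 1).flatMap (fun i =>
          (pvTailGt i ((pvPositions a).getD (PySem.List.pyGetD a i 0 + 1) [])).map (fun j => (i, j))) := by
    unfold tim_cap_chi_so_alt
    rw [PySem.List.foldl_append_eq_flatMap, PySem.List.enumerate_eq_map_pyRange a 0]
    simp [List.flatMap_map, PySem.List.len]
  rw [hA, hB]
  rcases Nat.eq_zero_or_pos a.length with h0 | hpos'
  · simp [h0, PySem.List.pyRange_one_eq_nil (le_refl (0 : Int))]
  · have hsplit : PySem.List.pyRange 0 (a.length : Int) 1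
        = PySem.List.pyRange 0 ((a.length : Int) - 1) 1 ++ [(a.length : Int) - 1] := by
      have h := PySem.List.pyRange_one_succ_right (a := 0) (b := (a.length : Int) - 1) (by omega)
      rw [sub_add_cancel] at h
      exact h
    rw [hsplit, List.flatMap_append]
    have hlast : [(a.length : Int) - 1].flatMap (fun i =>
        (pvTailGt i ((pvPositions a).getD (PySem.List.pyGetD a i 0 + 1) [])).map (fun j => (i, j))) = [] := by
      simp only [List.flatMap_cons, List.flatMap_nil, List.append_nil]
      rw [pvPositions_spec, pvTailGt_eq_filter _ _
        ((PySem.List.pairwise_lt_pyRange_one 0 (a.length : Int)).sublist (List.filter_sublist))]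
      rw [List.filter_filter, List.filter_eq_nil_iff.mpr, List.map_nil]
      intro x hx
      have := PySem.List.mem_pyRange_one.mp hx
      simp only [Bool.and_eq_true, decide_eq_true_eq, not_and]
      intro h'
      omega
    rw [hlast, List.append_nil]
    apply List.flatMap_congr
    intro i hi
    have hi0 : 0 ≤ i := (PySem.List.mem_pyRange_one.mp hi).1
    rw [pvPositions_spec, pvTailGt_eq_filter _ _
      ((PySem.List.pairwise_lt_pyRange_one 0 (a.length : Int)).sublist (List.filter_sublist))]
    rw [List.filter_filter, ← filter_pyRange_gt i (a.length : Int) hi0, List.filter_filter]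
    apply congrArg (List.map _)
    apply List.filter_congr
    intro x hx
    rw [Bool.and_comm, BEq.comm]

-- ===== VERDICT (by name: the statement is the Claim_ definition above) =====
theorem tim_cap_chi_so_spec : Claim_equal_tim_cap_chi_so := by
  intro a _
  exact tim_cap_chi_so_eq a
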